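-- pv_equiv track=rewrite | github.com/santoshkumarm29/gt-dags | dags/common/kpi_email_utils.py | combine_annotations
-- ===== SOURCE A (Python) =====
-- def combine_annotations(custom_annotations, ads_annotations):
--     output = custom_annotations.copy()
--     for key, value in ads_annotations.items():
--         if key in output:
--             output[key] += ' ' + value
--         else:
--             output[key] = value
--     return output
-- ===== SOURCE B (Python) =====
-- def combine_annotations(custom_annotations, ads_annotations):
--     # Different algorithm: instead of patching a copy of custom with ads, pour
--     # every (key, value) pair of both dicts into a key -> list-of-values
--     # multimap (first-seen key order), then render each bucket joined by ' '.
--     parts = {}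
--     for source in (custom_annotations, ads_annotations):
--         for key, value in source.items():
--             parts.setdefault(key, []).append(value)
--     return {key: ' '.join(values) for key, values in parts.items()}
-- ===== Notes on version B (the rewrite author's own statement) =====
-- stated objective: alternative
-- what changed: B replaces A's copy-then-update of the custom dict by a grouping algorithm: it pours the item streams of both dicts into a key -> list-of-values multimap (setdefault/append) and then renders each bucket with ' '.join, so there is no in-place concatenation and no collision branch; Pre_ excludes association lists with duplicate keys, which represent no Python dict input.
import Mathlib
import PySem

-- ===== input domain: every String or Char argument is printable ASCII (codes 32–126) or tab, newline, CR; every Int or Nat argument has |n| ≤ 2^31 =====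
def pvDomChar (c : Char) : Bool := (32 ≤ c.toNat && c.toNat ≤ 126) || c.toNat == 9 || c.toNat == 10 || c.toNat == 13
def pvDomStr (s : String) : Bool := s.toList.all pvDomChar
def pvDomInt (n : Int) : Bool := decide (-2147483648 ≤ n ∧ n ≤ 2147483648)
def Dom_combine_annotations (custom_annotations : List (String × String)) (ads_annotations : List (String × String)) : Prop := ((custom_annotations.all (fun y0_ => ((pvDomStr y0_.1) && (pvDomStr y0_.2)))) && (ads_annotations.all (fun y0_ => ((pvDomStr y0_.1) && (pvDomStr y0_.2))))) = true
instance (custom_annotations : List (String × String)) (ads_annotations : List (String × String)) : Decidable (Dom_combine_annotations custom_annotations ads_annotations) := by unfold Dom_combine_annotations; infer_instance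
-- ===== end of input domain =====

-- B re-solves the task by a different algorithm: it groups the item streams of both dicts into a
-- key -> list-of-values multimap and renders each bucket with ' '.join, instead of A's
-- copy-then-update with an in-place concatenation on collisions; objective: alternative.


-- ===== PORT A =====
-- body of A's for-loop: if key in output: output[key] += ' ' + value else: output[key] = value
def stepA (output : PySem.Dict String String) (kv : String × String) : PySem.Dict String String :=
  if output.contains kv.1 then
    output.insert kv.1 ((output.getD kv.1 "") ++ " " ++ kv.2)
  else
    output.insert kv.1 kv.2

def combine_annotations (custom_annotations : List (String × String)) (ads_annotations : List (String × String)) : List (String × String) :=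
  (ads_annotations.foldl stepA (PySem.Dict.mk custom_annotations)).items

-- ===== PORT B =====
-- body of B's inner loop: parts.setdefault(key, []).append(value), i.e. parts[key] = parts.get(key, []) + [value]
def group_step (parts : PySem.Dict String (List String)) (kv : String × String) : PySem.Dict String (List String) :=
  parts.modify kv.1 [] (· ++ [kv.2])

def combine_annotations_alt (custom_annotations : List (String × String)) (ads_annotations : List (String × String)) : List (String × String) :=
  -- for source in (custom_annotations, ads_annotations): for key, value in source.items(): …
  let parts := [custom_annotations, ads_annotations].foldl
    (fun d source => source.foldl group_step d) PySem.Dict.empty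
  -- {key: ' '.join(values) for key, values in parts.items()}
  (parts.items.foldl (fun d p => d.insert p.1 (PySem.Str.join " " p.2)) PySem.Dict.empty).items

-- ===== PRECONDITION & SPEC =====
-- The Python arguments are dicts, whose keys are necessarily distinct; an association list with
-- duplicate keys represents no Python input, so those lists are excluded.
def Pre_combine_annotations (custom_annotations : List (String × String)) (ads_annotations : List (String × String)) : Prop :=
  (custom_annotations.map Prod.fst).Nodup ∧ (ads_annotations.map Prod.fst).Nodup
instance (custom_annotations : List (String × String)) (ads_annotations : List (String × String)) : Decidable (Pre_combine_annotations custom_annotations ads_annotations) := by unfold Pre_combine_annotations; infer_instance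
def pvWitness_combine_annotations : (List (String × String)) × (List (String × String)) :=
  ([("a", "1")], [("a", "2"), ("b", "3")])

def Spec_combine_annotations (custom_annotations : List (String × String)) (ads_annotations : List (String × String)) (out : List (String × String)) : Prop := out = combine_annotations_alt custom_annotations ads_annotations
instance (custom_annotations : List (String × String)) (ads_annotations : List (String × String)) (out : List (String × String)) : Decidable (Spec_combine_annotations custom_annotations ads_annotations out) := by unfold Spec_combine_annotations; infer_instance

-- ===== CLAIM (what is proved, stated in full; the proofs are below) =====
def Claim_equal_combine_annotations : Prop := ∀ (custom_annotations : List (String × String)) (ads_annotations : List (String × String)), Dom_combine_annotations custom_annotations ads_annotations → Pre_combine_annotations custom_annotations ads_annotations → Spec_combine_annotations custom_annotations ads_annotations (combine_annotations custom_annotations ads_annotations)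

-- ===== LEMMAS AND PROOFS =====

-- the value the merged dict carries at a custom entry kv, given the ads list
def mval (a : List (String × String)) (kv : String × String) : String × String :=
  (kv.1, if (PySem.Dict.mk a).contains kv.1 then kv.2 ++ " " ++ ((PySem.Dict.mk a).getD kv.1 "") else kv.2)

lemma contains_insert_of_contains (d : PySem.Dict String String) (k : String) (v : String)
    (h : d.contains k = true) (x : String) : (d.insert k v).contains x = d.contains x := by
  rw [PySem.Dict.contains_insert]
  by_cases hx : x = k
  · subst hx; simp [h]
  · simp [hx]

-- A's loop characterised: updated custom entries, then the fresh ads entries in order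
lemma foldA_items (l : List (String × String)) : ∀ (d : PySem.Dict String String),
    d.keys.Nodup → (l.map Prod.fst).Nodup →
    (l.foldl stepA d).items = d.items.map (mval l) ++ l.filter (fun kv => !d.contains kv.1) := by
  induction l with
  | nil =>
    intro d _ _
    have hid : ∀ p ∈ d.items, mval [] p = id p := by
      intro p _; simp [mval, PySem.Dict.contains_mk]
    rw [List.map_congr_left hid, List.map_id]
    simp
  | cons kv t ih =>
    intro d hd hl
    obtain ⟨k, v⟩ := kv
    have hl' : (k :: t.map Prod.fst).Nodup := by simpa using hl
    have hknt : k ∉ t.map Prod.fst := (List.nodup_cons.mp hl').1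
    have hlt : (t.map Prod.fst).Nodup := (List.nodup_cons.mp hl').2
    have hanyt : (t.any fun q => q.1 == k) = false := by
      simp only [List.any_eq_false]
      intro q hq
      simp only [beq_iff_eq]
      exact fun hqk => hknt (hqk ▸ List.mem_map_of_mem hq)
    have hcontk : (PySem.Dict.mk t).contains k = false := by
      rw [PySem.Dict.contains_mk]; exact hanyt
    by_cases hc : d.contains k = true
    · -- collision: A rewrites the existing entry in place
      have hstep : stepA d (k, v) = d.insert k ((d.getD k "") ++ " " ++ v) := by
        simp [stepA, hc]
      have hkeys : (d.insert k ((d.getD k "") ++ " " ++ v)).keys = d.keys :=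
        PySem.Dict.keys_insert_of_contains d _ hc
      have hIH := ih (d.insert k ((d.getD k "") ++ " " ++ v)) (hkeys ▸ hd) hlt
      simp only [List.foldl_cons, hstep, hIH]
      have hfiltcongr : ∀ x ∈ t, (!(d.insert k ((d.getD k "") ++ " " ++ v)).contains x.1)
          = (!d.contains x.1) := by
        intro x _; rw [contains_insert_of_contains d k _ hc]
      rw [List.filter_congr hfiltcongr]
      have hmap : d.items.map (mval ((k, v) :: t))
          = (d.items.map (fun p => if (p.1 == k) = true then (k, (d.getD k "") ++ " " ++ v) else p)).map (mval t) := by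
        rw [List.map_map]
        apply List.map_congr_left
        intro p hp
        obtain ⟨pk, pv⟩ := p
        by_cases hpk : pk = k
        · subst hpk
          have hget : d.get? pk = some pv := PySem.Dict.get?_of_mem_items d hp hd
          simp [mval, PySem.Dict.contains_mk, PySem.Dict.getD_eq_get?_getD,
            PySem.Dict.get?_mk_cons, hanyt, hget]
        · have hbeq : (pk == k) = false := by simpa using hpk
          have hbeq2 : (k == pk) = false := by simpa using Ne.symm hpk
          simp only [Function.comp_apply, mval, PySem.Dict.contains_mk, PySem.Dict.getD_eq_get?_getD,
            PySem.Dict.get?_mk_cons, List.any_cons, hbeq, hbeq2, Bool.false_or,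
            Bool.false_eq_true, if_false]
      rw [hmap, PySem.Dict.items_insert_of_contains d _ hc]
      simp [hc]
    · -- fresh key: A appends it
      have hcf : d.contains k = false := by simpa using hc
      have hstep : stepA d (k, v) = d.insert k v := by simp [stepA, hcf]
      have hitems : (d.insert k v).items = d.items ++ [(k, v)] :=
        PySem.Dict.items_insert_of_not_contains d v hcf
      have hkeys : (d.insert k v).keys = d.keys ++ [k] :=
        PySem.Dict.keys_insert_of_not_contains d v hcf
      have hknotin : k ∉ d.keys := by
        intro hmem
        exact absurd ((PySem.Dict.contains_iff_mem_keys d k).mpr hmem) (by simp [hcf])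
      have hnodup' : (d.insert k v).keys.Nodup := by
        rw [hkeys]
        have hne : ∀ a ∈ d.keys, ¬ a = k := fun a ha hak => hknotin (hak ▸ ha)
        simp [List.nodup_append, hd]
        exact hne
      have hIH := ih (d.insert k v) hnodup' hlt
      simp only [List.foldl_cons, hstep, hIH]
      have hfiltcongr : ∀ x ∈ t, (!(d.insert k v).contains x.1) = (!d.contains x.1) := by
        intro x hx
        rw [PySem.Dict.contains_insert]
        have : x.1 ≠ k := fun hxk => hknt (hxk ▸ List.mem_map_of_mem hx)
        simp [this]
      rw [List.filter_congr hfiltcongr, hitems]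
      have hmvalkv : mval t (k, v) = (k, v) := by simp [mval, hcontk]
      have hmap : d.items.map (mval t) = d.items.map (mval ((k, v) :: t)) := by
        apply List.map_congr_left
        intro p hp
        have hpk : p.1 ≠ k := fun h => hknotin (h ▸ List.mem_map_of_mem hp)
        have hbeq2 : (k == p.1) = false := by simpa using Ne.symm hpk
        simp only [mval, PySem.Dict.contains_mk, PySem.Dict.getD_eq_get?_getD,
          PySem.Dict.get?_mk_cons, List.any_cons, hbeq2, Bool.false_or,
          Bool.false_eq_true, if_false]
      rw [List.map_append, hmap]
      simp [hcf, hmvalkv]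

-- ' '.join on a one- and a two-element bucket
lemma join_one (x : String) : PySem.Str.join " " [x] = x := by
  simp [PySem.Str.join]

lemma join_two (x y : String) : PySem.Str.join " " [x, y] = x ++ " " ++ y := by
  have h : (PySem.Str.join " " [x, y]).toList = (x ++ " " ++ y).toList := by
    simp [PySem.Str.toList_join, PySem.Chars.join_cons_cons, PySem.Chars.join_singleton]
  exact String.toList_inj.mp h

-- filtering a list of pairs by an in-list key with distinct keys yields exactly that pair
lemma filter_key_eq_singleton (l : List (String × String)) (kv : String × String)
    (h : kv ∈ l) (hnd : (l.map Prod.fst).Nodup) :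
    l.filter (fun p => p.1 == kv.1) = [kv] := by
  induction l with
  | nil => cases h
  | cons p t ih =>
    have hpt : p.1 ∉ t.map Prod.fst := (List.nodup_cons.mp (by simpa using hnd)).1
    have hnt : (t.map Prod.fst).Nodup := (List.nodup_cons.mp (by simpa using hnd)).2
    rcases List.mem_cons.mp h with hkp | hkt
    · subst hkp
      have htnil : t.filter (fun q => q.1 == kv.1) = [] := by
        rw [List.filter_eq_nil_iff]
        intro q hq
        simp only [beq_iff_eq]
        exact fun hq1 => hpt (hq1 ▸ List.mem_map_of_mem hq)
      simp [htnil]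
    · have hne : (p.1 == kv.1) = false := by
        simp only [beq_eq_false_iff_ne, ne_eq]
        exact fun hp1 => hpt (hp1 ▸ List.mem_map_of_mem hkt)
      simp [hne, ih hkt hnt]

-- a key absent from the dict view filters to nothing
lemma filter_key_eq_nil (l : List (String × String)) (k : String)
    (h : (PySem.Dict.mk l).contains k = false) :
    l.filter (fun p => p.1 == k) = [] := by
  rw [PySem.Dict.contains_mk, List.any_eq_false] at h
  rw [List.filter_eq_nil_iff]
  intro q hq
  exact h q hq

-- membership test through the key list vs through the dict view
lemma set_contains_map_fst (l : List (String × String)) (k : String) :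
    PySem.Set.contains (l.map Prod.fst) k = (PySem.Dict.mk l).contains k := by
  simp only [PySem.Set.contains_eq_listContains, PySem.Dict.contains_mk]
  induction l with
  | nil => rfl
  | cons p t ih =>
    by_cases hp : p.1 = k
    · simp [hp]
    · have h1 : (k == p.1) = false := by simpa using Ne.symm hp
      have h2 : (p.1 == k) = false := by simpa using hp
      simpa [List.contains_cons, h1, h2] using ih

-- pushing a key filter through map Prod.fst
lemma map_fst_filter (l : List (String × String)) (p : String → Bool) :
    (l.map Prod.fst).filter p = (l.filter (fun kv => p kv.1)).map Prod.fst := by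
  induction l with
  | nil => rfl
  | cons h t ih => by_cases hp : p h.1 <;> simp [hp, ih]

-- ===== VERDICT (by name: the statement is the Claim_ definition above) =====
theorem combine_annotations_spec : Claim_equal_combine_annotations := by
  intro c a _ hpre
  obtain ⟨hc, ha⟩ := hpre
  unfold Spec_combine_annotations combine_annotations combine_annotations_alt
  -- A's side: updated custom entries, then fresh ads entries
  have hA := foldA_items a (PySem.Dict.mk c) (by rw [PySem.Dict.keys_mk]; exact hc) ha
  rw [hA]
  -- B's side: the two nested source loops are one grouping fold over c ++ a
  have hfold : [c, a].foldl (fun d source => source.foldl group_step d) PySem.Dict.empty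
      = (c ++ a).foldl group_step PySem.Dict.empty := by
    simp [List.foldl_append]
  rw [hfold]
  set P := (c ++ a).foldl group_step PySem.Dict.empty with hP
  have hstep : group_step = fun (d : PySem.Dict String (List String)) (p : String × String) =>
      d.modify p.1 [] (· ++ [p.2]) := rfl
  -- keys of the multimap: every key of c ++ a, first occurrence order
  have hKnodup : P.keys.Nodup := by
    rw [hP, hstep]
    exact PySem.Dict.nodup_keys_foldl_modify_key (c ++ a) Prod.fst []
      (fun d p => (· ++ [p.2])) PySem.Dict.empty (by simp)
  have hK : P.keys = c.map Prod.fst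
      ++ (a.filter (fun kv => !(PySem.Dict.mk c).contains kv.1)).map Prod.fst := by
    rw [hP, hstep,
      PySem.Dict.keys_foldl_modify_key (c ++ a) Prod.fst [] (fun d p => (· ++ [p.2]))
        PySem.Dict.empty]
    rw [PySem.Dict.keys_empty, PySem.Set.update_nil_left, List.map_append,
      PySem.Set.ofList_append, PySem.Set.ofList_eq_self_of_nodup _ hc,
      PySem.Set.update_eq_append_filter, PySem.Set.ofList_eq_self_of_nodup _ ha,
      map_fst_filter]
    have hpred : ∀ kv ∈ a, (!PySem.Set.contains (List.map Prod.fst c) kv.1)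
        = (!(PySem.Dict.mk c).contains kv.1) := by
      intro kv _; rw [set_contains_map_fst]
    rw [List.filter_congr hpred]
  -- the bucket collected at key k
  have hG : ∀ k, P.getD k [] = ((c ++ a).filter (fun p => p.1 == k)).map (·.2) := by
    intro k
    rw [hP, hstep, PySem.Dict.getD_foldl_modify_append]
    simp [PySem.Dict.getD_empty]
  -- the rendering comprehension maps over the multimap's items
  have hrender : (P.items.foldl (fun d p => d.insert p.1 (PySem.Str.join " " p.2))
      PySem.Dict.empty).items = P.items.map (fun p => (p.1, PySem.Str.join " " p.2)) := by
    have hnd : (P.items.map Prod.fst).Nodup := by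
      have : P.keys = P.items.map Prod.fst := by simp only [PySem.Dict.keys]
      rw [← this]; exact hKnodup
    have := PySem.Dict.items_foldl_insert_fresh (l := P.items) (k := Prod.fst)
      (v := fun p => PySem.Str.join " " p.2) (d := PySem.Dict.empty) (by simp) hnd
    simpa using this
  rw [hrender, PySem.Dict.items_eq_map_keys P hKnodup [], List.map_map]
  have hFG : P.keys.map ((fun p : String × List String => (p.1, PySem.Str.join " " p.2)) ∘
      (fun k => (k, P.getD k [])))
      = P.keys.map (fun k => (k, PySem.Str.join " "
          (((c ++ a).filter (fun p => p.1 == k)).map (·.2)))) := by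
    apply List.map_congr_left
    intro k _
    simp only [Function.comp_apply]
    rw [hG k]
  rw [hFG, hK, List.map_append, List.map_map, List.map_map]
  congr 1
  · -- custom entries: one c-bucket value, plus the ads value on a collision
    apply List.map_congr_left
    intro kv hkv
    simp only [Function.comp_apply, List.filter_append, List.map_append]
    rw [filter_key_eq_singleton c kv hkv hc]
    by_cases hca : (PySem.Dict.mk a).contains kv.1 = true
    · have hex : ∃ p ∈ a, (p.1 == kv.1) = true := by
        rw [PySem.Dict.contains_mk, List.any_eq_true] at hca
        exact hca
      obtain ⟨p, hpa, hpk⟩ := hex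
      have hpk' : p.1 = kv.1 := by simpa using hpk
      have hpmem : (kv.1, p.2) ∈ a := by rw [← hpk']; exact hpa
      have hfa : a.filter (fun q => q.1 == kv.1) = [(kv.1, p.2)] := by
        have := filter_key_eq_singleton a (kv.1, p.2) hpmem ha
        simpa using this
      have hgd : (PySem.Dict.mk a).getD kv.1 "" = p.2 := by
        have hget : (PySem.Dict.mk a).get? kv.1 = some p.2 :=
          PySem.Dict.get?_of_mem_items (PySem.Dict.mk a) (by simpa using hpmem)
            (by rw [PySem.Dict.keys_mk]; exact ha)
        rw [PySem.Dict.getD_eq_get?_getD, hget]; rfl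
      rw [hfa]
      simp only [List.map_cons, List.map_nil, List.singleton_append]
      rw [join_two, mval, if_pos hca, hgd]
    · have hcaf : (PySem.Dict.mk a).contains kv.1 = false := Bool.eq_false_iff.mpr hca
      rw [filter_key_eq_nil a kv.1 hcaf]
      simp only [List.map_cons, List.map_nil, List.append_nil]
      rw [join_one, mval, if_neg (by simp [hcaf])]
  · -- ads-only entries come through unchanged
    symm
    have hid : ∀ kv ∈ a.filter (fun kv => !(PySem.Dict.mk c).contains kv.1),
        ((fun k => (k, PySem.Str.join " "
          (((c ++ a).filter (fun p => p.1 == k)).map (·.2)))) ∘ Prod.fst) kv = id kv := by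
      intro kv hkv
      have hmem := List.mem_filter.mp hkv
      have hkva : kv ∈ a := hmem.1
      have hkc : (PySem.Dict.mk c).contains kv.1 = false := by
        have := hmem.2; simpa using this
      simp only [Function.comp_apply, List.filter_append, List.map_append, id_eq]
      rw [filter_key_eq_nil c kv.1 hkc, filter_key_eq_singleton a kv hkva ha]
      simp [join_one]
    rw [List.map_congr_left hid, List.map_id]
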